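-- pv_equiv track=rewrite | github.com/adam-andersson/advent-of-code-2024 | 07/solution.py | run_equation
-- ===== SOURCE A (Python) =====
-- def run_equation(op, eq, acc, target, part2=False):
--     eq = eq[:]
--     if len(eq) == 0 or acc > target:
--         if acc == target:
--             return True
--         return False
--
--     value = eq.pop(0)
--
--     if op == "+":
--         acc += value
--     elif op == "*":
--         acc *= value
--     elif op == "||":
--         acc = int(str(acc) + str(value))
--
--     return any(
--         [
--             run_equation("+", eq, acc, target, part2),
--             run_equation("*", eq, acc, target, part2),
--             part2 & run_equation("||", eq, acc, target, part2),
--         ]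
--     )
-- ===== SOURCE B (Python) =====
-- def run_equation(op, eq, acc, target, part2=False):
--     n = len(eq)
--     stack = [(op, 0, acc)]
--     while stack:
--         o, i, a = stack.pop()
--         if i >= n or a > target:
--             if a == target:
--                 return True
--             continue
--         v = eq[i]
--         if o == "+":
--             a += v
--         elif o == "*":
--             a *= v
--         elif o == "||":
--             a = int(str(a) + str(v))
--         stack.append(("+", i + 1, a))
--         stack.append(("*", i + 1, a))
--         if part2:
--             stack.append(("||", i + 1, a))
--     return False
-- ===== Notes on version B (the rewrite author's own statement) =====
-- stated objective: alternative
-- what changed: Recursive three-way branching with an any([...]) over fully evaluated subcalls is replaced by an explicit iterative DFS over a stack of (op, index, acc) states indexing into the original list, returning True as soon as a leaf hits the target and pushing the '||' child only when part2 is set.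
-- outside the precondition, e.g. on run_equation('+', [1000000, -1], 0, 3, False): A returns False, B returns False
import Mathlib
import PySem

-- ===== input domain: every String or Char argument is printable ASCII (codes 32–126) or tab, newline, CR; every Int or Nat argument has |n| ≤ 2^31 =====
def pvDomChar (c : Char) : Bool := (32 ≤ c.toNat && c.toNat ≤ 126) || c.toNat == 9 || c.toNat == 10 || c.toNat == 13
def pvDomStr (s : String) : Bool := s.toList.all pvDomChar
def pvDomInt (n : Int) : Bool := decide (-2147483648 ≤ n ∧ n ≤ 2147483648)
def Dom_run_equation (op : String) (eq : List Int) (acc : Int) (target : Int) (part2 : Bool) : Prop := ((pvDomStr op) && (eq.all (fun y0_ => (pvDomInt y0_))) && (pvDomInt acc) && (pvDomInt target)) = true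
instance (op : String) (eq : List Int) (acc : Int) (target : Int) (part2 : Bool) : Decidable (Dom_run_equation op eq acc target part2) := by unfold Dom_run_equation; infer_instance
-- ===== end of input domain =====

-- B replaces A's recursive three-way any([...]) search by an explicit iterative DFS over a stack of
-- (op, index, acc) states indexing into the original list (different decomposition, same results).


-- ===== PORT A =====
-- helper shared by both ports: the op application both Pythons write with the same three branches
-- ('||' is int(str(acc)+str(value)), exact via PySem.Int.ofChars?/toChars; total under Pre_ below)
def pvApplyOp (op : String) (acc v : Int) : Int :=
  if op = "+" then acc + v
  else if op = "*" then acc * v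
  else if op = "||" then (PySem.Int.ofChars? (PySem.Int.toChars acc ++ PySem.Int.toChars v)).getD 0
  else acc

def run_equation (op : String) (eq : List Int) (acc : Int) (target : Int) (part2 : Bool) : Bool :=
  match eq with
  | [] => decide (acc = target)
  | v :: rest =>
    if target < acc then decide (acc = target)
    else
      let a := pvApplyOp op acc v
      (run_equation "+" rest a target part2 ||
       run_equation "*" rest a target part2 ||
       (part2 && run_equation "||" rest a target part2))

-- ===== PORT B =====
-- the while-stack loop of Source B: pop a state, leaf-test, else push the children
def run_equation_go (eq : List Int) (target : Int) (part2 : Bool) : List (String × Nat × Int) → Bool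
  | [] => false
  | (o, i, a) :: rest =>
    if eq.length ≤ i ∨ target < a then
      if a = target then true else run_equation_go eq target part2 rest
    else
      let a' := pvApplyOp o a (eq.getD i 0)
      run_equation_go eq target part2
        ((if part2 then [("||", i + 1, a')] else []) ++ ("*", i + 1, a') :: ("+", i + 1, a') :: rest)
termination_by stack => (stack.map (fun s => 4 ^ (eq.length - s.2.1))).sum
decreasing_by
  · simp only [List.map_cons, List.sum_cons]
    have : 0 < 4 ^ (eq.length - i) := Nat.pow_pos (by norm_num)
    omega
  · have h4 : 0 < 4 ^ (eq.length - (i + 1)) := Nat.pow_pos (by norm_num)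
    have h5 : 4 ^ (eq.length - i) = 4 ^ (eq.length - (i + 1)) * 4 := by
      rw [show eq.length - i = (eq.length - (i + 1)) + 1 by omega, pow_succ]
    cases part2 <;> simp [h5] <;> omega

def run_equation_alt (op : String) (eq : List Int) (acc : Int) (target : Int) (part2 : Bool) : Bool :=
  run_equation_go eq target part2 [(op, 0, acc)]

-- ===== PRECONDITION & SPEC =====
-- Pre_ excludes lists containing a negative element, except when the very first call is a leaf
-- (empty list or acc > target): A's int(str(acc)+str(value)) in the eagerly evaluated '||' branch
-- raises ValueError once a negative value is reached, and reachability of the first negative is not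
-- a closed-form condition, so inputs where a deep prune happens to save A are excluded too — see cites.
def Pre_run_equation (op : String) (eq : List Int) (acc : Int) (target : Int) (part2 : Bool) : Prop :=
  eq = [] ∨ target < acc ∨ ∀ v ∈ eq, 0 ≤ v
instance (op : String) (eq : List Int) (acc : Int) (target : Int) (part2 : Bool) : Decidable (Pre_run_equation op eq acc target part2) := by unfold Pre_run_equation; infer_instance

def pvWitness_run_equation : String × List Int × Int × Int × Bool := ("+", [1, 2], 0, 3, true)

def Spec_run_equation (op : String) (eq : List Int) (acc : Int) (target : Int) (part2 : Bool) (out : Bool) : Prop := out = run_equation_alt op eq acc target part2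
instance (op : String) (eq : List Int) (acc : Int) (target : Int) (part2 : Bool) (out : Bool) : Decidable (Spec_run_equation op eq acc target part2 out) := by unfold Spec_run_equation; infer_instance

-- ===== CLAIM (what is proved, stated in full; the proofs are below) =====
def Claim_equal_run_equation : Prop := ∀ (op : String) (eq : List Int) (acc : Int) (target : Int) (part2 : Bool), Dom_run_equation op eq acc target part2 → Pre_run_equation op eq acc target part2 → Spec_run_equation op eq acc target part2 (run_equation op eq acc target part2)

-- ===== LEMMAS AND PROOFS =====
-- B's DFS over a stack computes the disjunction, over the stack's states (op, i, a), of A's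
-- recursion on the corresponding suffix eq.drop i.
theorem run_equation_go_eq_any (eq : List Int) (target : Int) (part2 : Bool)
    (stack : List (String × Nat × Int)) :
    run_equation_go eq target part2 stack =
      stack.any (fun s => run_equation s.1 (eq.drop s.2.1) s.2.2 target part2) := by
  induction stack using run_equation_go.induct eq target part2 with
  | case1 => simp [run_equation_go]
  | case2 o i rest h =>
    have hi : eq.length ≤ i := by
      rcases h with h | h
      · exact h
      · omega
    rw [run_equation_go]
    simp only [List.any_cons, List.drop_eq_nil_of_le hi, run_equation]
    simp [hi]
  | case3 o i a rest h ha ih =>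
    rw [run_equation_go]
    rw [if_pos h, if_neg ha, ih, List.any_cons]
    have hhead : run_equation o (eq.drop i) a target part2 = false := by
      by_cases hi : eq.length ≤ i
      · simp [List.drop_eq_nil_of_le hi, run_equation, ha]
      · rw [List.drop_eq_getElem_cons (by omega : i < eq.length), run_equation]
        have ht : target < a := by rcases h with h' | h' <;> omega
        simp [ht, ha]
    simp [hhead]
  | case4 o i a rest h a' ih =>
    have hi : i < eq.length := by omega
    have ht : ¬ target < a := by omega
    rw [show a' = pvApplyOp o a (eq.getD i 0) from rfl] at ih
    simp only [dite_eq_ite] at ih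
    rw [run_equation_go, if_neg h]
    show run_equation_go eq target part2
        ((if part2 = true then [("||", i + 1, pvApplyOp o a (eq.getD i 0))] else []) ++
          ("*", i + 1, pvApplyOp o a (eq.getD i 0)) ::
            ("+", i + 1, pvApplyOp o a (eq.getD i 0)) :: rest) =
      ((o, i, a) :: rest).any fun s => run_equation s.1 (List.drop s.2.1 eq) s.2.2 target part2
    rw [ih, List.any_cons, List.drop_eq_getElem_cons hi, run_equation, if_neg ht,
        List.getD_eq_getElem eq 0 hi]
    cases part2 <;>
      simp [Bool.or_comm, Bool.or_left_comm, Bool.or_assoc]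

-- ===== VERDICT (by name: the statement is the Claim_ definition above) =====
theorem run_equation_spec : Claim_equal_run_equation := by
  intro op eq acc target part2 _ _
  unfold Spec_run_equation run_equation_alt
  rw [run_equation_go_eq_any]
  simp
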